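-- pv_equiv track=rewrite | github.com/nicolegrimaldos/CS303E | MyStringFunctions.py | myRFind
-- ===== SOURCE A (Python) =====
-- def myRFind( str, ch ):
--     # Return the index of the last (rightmost) occurrence of
--     # ch in str, if any.  Return -1 if ch does not occur in str.
--     index = ""
--     i = 0
--     found = "No"
--     for x in str:
--         if ch == x:
--             found = "Yes"
--             index = i
--             i += 1
--         else:
--             i += 1
--     if found == "No":
--         return -1
--     else:
--         return index
-- ===== SOURCE B (Python) =====
-- def myRFind(str, ch):
--     # Scan from the right and return the first match immediately.
--     for i in reversed(range(len(str))):
--         if ch == str[i]: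
--             return i
--     return -1
-- ===== Notes on version B (the rewrite author's own statement) =====
-- stated objective: alternative
-- what changed: Replaces the full forward pass that keeps a running last-match index (with string flags) by a descending scan from the right that returns the first match immediately.
import Mathlib
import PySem

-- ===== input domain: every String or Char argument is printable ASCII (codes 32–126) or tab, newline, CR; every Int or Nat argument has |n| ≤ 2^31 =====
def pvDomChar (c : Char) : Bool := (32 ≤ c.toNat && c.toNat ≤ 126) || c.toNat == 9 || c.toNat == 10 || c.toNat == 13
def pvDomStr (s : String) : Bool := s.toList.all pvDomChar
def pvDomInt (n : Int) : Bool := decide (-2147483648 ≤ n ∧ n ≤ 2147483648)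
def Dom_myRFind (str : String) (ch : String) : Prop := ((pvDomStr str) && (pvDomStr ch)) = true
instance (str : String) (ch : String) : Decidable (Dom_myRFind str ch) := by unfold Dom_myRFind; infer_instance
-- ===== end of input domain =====

-- B replaces A's forward pass keeping a running last-match index by a descending
-- scan from the right that returns the first match; return values are proved equal.

-- ===== PORT A =====
-- state (found, index, i): found = "Yes"/"No" flag, index = last match position, i = counter
def myRFindStep (ch : String) (s : Bool × Int × Int) (x : Char) : Bool × Int × Int :=
  if ch.toList = [x] then (true, s.2.2, s.2.2 + 1) else (s.1, s.2.1, s.2.2 + 1)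

def myRFind (str : String) (ch : String) : Int :=
  let st := str.toList.foldl (myRFindStep ch) (false, 0, 0)
  if st.1 = false then -1 else st.2.1

-- ===== PORT B =====
-- the descending loop `for i in reversed(range(len(str)))`: the element at index i
-- is the head of the remaining reversed list; return i on the first match, else -1.
def myRFindDesc (ch : String) : List Char → Int → Int
  | [], _ => -1
  | c :: rest, i => if ch.toList = [c] then i else myRFindDesc ch rest (i - 1)

def myRFind_alt (str : String) (ch : String) : Int :=
  myRFindDesc ch str.toList.reverse ((str.toList.length : Int) - 1)

-- ===== PRECONDITION & SPEC =====
def Spec_myRFind (str : String) (ch : String) (out : Int) : Prop := out = myRFind_alt str ch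
instance (str : String) (ch : String) (out : Int) : Decidable (Spec_myRFind str ch out) := by unfold Spec_myRFind; infer_instance

-- ===== CLAIM (what is proved, stated in full; the proofs are below) =====
def Claim_equal_myRFind : Prop := ∀ (str : String) (ch : String), Dom_myRFind str ch → Spec_myRFind str ch (myRFind str ch)

-- ===== LEMMAS AND PROOFS =====

-- ===== VERDICT (by name: the statement is the Claim_ definition above) =====
lemma foldl_counter (ch : String) (l : List Char) (f : Bool) (idx i : Int) :
    (l.foldl (myRFindStep ch) (f, idx, i)).2.2 = i + l.length := by
  induction l generalizing f idx i with
  | nil => simp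
  | cons c rest ih =>
    simp only [List.foldl_cons, myRFindStep]
    split_ifs <;> simp [ih] <;> omega

lemma main_lemma (ch : String) (l : List Char) (i : Int) :
    myRFindDesc ch l.reverse (i + l.length - 1) =
      (let st := l.foldl (myRFindStep ch) (false, 0, i)
       if st.1 = false then -1 else st.2.1) := by
  induction l using List.reverseRecOn generalizing i with
  | nil => simp [myRFindDesc]
  | append_singleton xs c ih =>
    simp only [List.reverse_append, List.reverse_singleton, List.singleton_append,
      List.foldl_append, List.foldl_cons, List.foldl_nil, myRFindDesc]
    by_cases h : ch.toList = [c]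
    · have hc := foldl_counter ch xs false 0 i
      simp only [h, if_pos rfl, myRFindStep, if_pos rfl]
      simp only [hc, List.length_append, List.length_singleton]
      push_cast
      ring_nf
    · have := ih i
      simp only [myRFindStep, if_neg h]
      have harg : (i + ↑(xs ++ [c]).length - 1) - 1 = i + ↑xs.length - 1 := by
        simp [List.length_append]; omega
      simp only [if_neg h, harg]
      simp only [List.length_append] at this ⊢
      convert this using 2

-- ===== VERDICT (by name: the statement is the Claim_ definition above) =====
theorem myRFind_spec : Claim_equal_myRFind := by
  intro str ch _
  unfold Spec_myRFind myRFind myRFind_alt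
  have := main_lemma ch str.toList 0
  simpa using this.symm
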